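-- pv_equiv track=rewrite | github.com/imroze/AI-BlogCurate | app.py | filter_urls_by_title_length
-- ===== SOURCE A (Python) =====
-- def filter_urls_by_title_length(filtered_title_urls):
--     url_dict = {}
--
--     for title, url in filtered_title_urls:
--         if url in url_dict:
--             if len(title) > len(url_dict[url][0]):
--                 url_dict[url] = (title, url)
--         else:
--             url_dict[url] = (title, url)
--
--     return list(url_dict.values())
-- ===== SOURCE B (Python) =====
-- def filter_urls_by_title_length(filtered_title_urls):
--     # Pass 1: group titles by url, preserving first-seen url order.
--     titles_by_url = {}
--     for title, url in filtered_title_urls: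
--         titles_by_url.setdefault(url, []).append(title)
--     # Pass 2: for each url pick the first longest title (max with key=len
--     # returns the first maximal element, matching the strict-'>' rule).
--     return [(max(titles, key=len), url) for url, titles in titles_by_url.items()]
-- ===== Notes on version B (the rewrite author's own statement) =====
-- stated objective: alternative
-- what changed: Replaces the single running-max pass keyed on a dict of (title,url) winners by a build-then-reduce decomposition: first group all titles per url into an ordered dict of lists, then pick each url's winner with max(key=len).
import Mathlib
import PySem

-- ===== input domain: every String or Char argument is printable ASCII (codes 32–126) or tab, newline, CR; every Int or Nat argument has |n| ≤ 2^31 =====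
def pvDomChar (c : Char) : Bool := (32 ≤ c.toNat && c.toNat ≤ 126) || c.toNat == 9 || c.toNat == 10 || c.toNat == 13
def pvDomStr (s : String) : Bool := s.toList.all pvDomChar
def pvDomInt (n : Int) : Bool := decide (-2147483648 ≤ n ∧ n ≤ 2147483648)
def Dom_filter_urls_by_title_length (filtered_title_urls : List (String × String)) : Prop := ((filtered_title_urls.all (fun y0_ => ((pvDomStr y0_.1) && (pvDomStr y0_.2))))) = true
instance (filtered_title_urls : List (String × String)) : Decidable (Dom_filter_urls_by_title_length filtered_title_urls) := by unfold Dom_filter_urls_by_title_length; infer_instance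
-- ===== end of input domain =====

-- B replaces A's single running-max pass by a two-pass build-then-reduce: group titles per url, then pick each url's first-longest title (objective: alternative decomposition).

-- ===== PORT A =====
-- A's loop: running winner per url; url_dict[url] is guarded by 'url in url_dict', so the total getD with a dummy default is exact.
def filter_urls_by_title_length (filtered_title_urls : List (String × String)) : List (String × String) :=
  (filtered_title_urls.foldl
    (fun d p =>
      if d.contains p.2 then
        if PySem.Str.len p.1 > PySem.Str.len (d.getD p.2 ("", "")).1 then
          d.insert p.2 (p.1, p.2)
        else d
      else d.insert p.2 (p.1, p.2))
    (PySem.Dict.empty : PySem.Dict String (String × String))).values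

-- ===== PORT B =====
-- Source B pass 1: setdefault(url, []).append(title) = modify url [] (· ++ [title]);
-- pass 2: max(titles, key=len) = PySem.List.maxD titles Str.len "" (titles is never empty, so the default is never used).
def filter_urls_by_title_length_alt (filtered_title_urls : List (String × String)) : List (String × String) :=
  let titles_by_url : PySem.Dict String (List String) :=
    filtered_title_urls.foldl (fun d p => d.modify p.2 [] (· ++ [p.1])) PySem.Dict.empty
  titles_by_url.items.map (fun kv => (PySem.List.maxD kv.2 PySem.Str.len "", kv.1))

-- ===== PRECONDITION & SPEC =====
def Spec_filter_urls_by_title_length (filtered_title_urls : List (String × String)) (out : List (String × String)) : Prop := out = filter_urls_by_title_length_alt filtered_title_urls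
instance (filtered_title_urls : List (String × String)) (out : List (String × String)) : Decidable (Spec_filter_urls_by_title_length filtered_title_urls out) := by unfold Spec_filter_urls_by_title_length; infer_instance

-- ===== CLAIM (what is proved, stated in full; the proofs are below) =====
def Claim_equal_filter_urls_by_title_length : Prop := ∀ (filtered_title_urls : List (String × String)), Dom_filter_urls_by_title_length filtered_title_urls → Spec_filter_urls_by_title_length filtered_title_urls (filter_urls_by_title_length filtered_title_urls)

-- ===== LEMMAS AND PROOFS =====

-- the translation from B's grouped entry (url, titles) to A's dict entry (url, (winner, url))
def pvF (kv : String × List String) : String × (String × String) :=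
  (kv.1, (PySem.List.maxD kv.2 PySem.Str.len "", kv.1))

theorem pv_max?_cons (a : String) (ts : List String) :
    PySem.List.max? (a :: ts) PySem.Str.len =
      some (ts.foldl (fun m t => if PySem.Str.len m < PySem.Str.len t then t else m) a) := by
  induction ts generalizing a with
  | nil => rfl
  | cons t ts ih =>
    have key : PySem.List.max? (a :: t :: ts) PySem.Str.len =
        PySem.List.max? ((if PySem.Str.len a < PySem.Str.len t then t else a) :: ts) PySem.Str.len := by
      simp only [PySem.List.max?, List.foldl_cons]
      congr 1
      show (if PySem.Str.len a < PySem.Str.len t then some t else some a)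
        = some (if PySem.Str.len a < PySem.Str.len t then t else a)
      exact (apply_ite some _ _ _).symm
    rw [key, ih]
    rfl

theorem pv_maxD_cons (a : String) (ts : List String) :
    PySem.List.maxD (a :: ts) PySem.Str.len "" =
      ts.foldl (fun m t => if PySem.Str.len m < PySem.Str.len t then t else m) a := by
  simp [PySem.List.maxD, pv_max?_cons]

theorem pv_maxD_append (ts : List String) (t : String) (h : ts ≠ []) :
    PySem.List.maxD (ts ++ [t]) PySem.Str.len "" =
      if PySem.Str.len (PySem.List.maxD ts PySem.Str.len "") < PySem.Str.len t then t
      else PySem.List.maxD ts PySem.Str.len "" := by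
  obtain ⟨a, ts, rfl⟩ := List.exists_cons_of_ne_nil h
  rw [List.cons_append, pv_maxD_cons, pv_maxD_cons, List.foldl_append, List.foldl_cons, List.foldl_nil]

theorem pv_loop_inv (l : List (String × String))
    (dA : PySem.Dict String (String × String)) (dB : PySem.Dict String (List String))
    (hnd : dB.keys.Nodup)
    (hne : ∀ kv ∈ dB.items, kv.2 ≠ [])
    (hI : dA.items = dB.items.map pvF) :
    (l.foldl
      (fun d p =>
        if d.contains p.2 then
          if PySem.Str.len p.1 > PySem.Str.len (d.getD p.2 ("", "")).1 then
            d.insert p.2 (p.1, p.2)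
          else d
        else d.insert p.2 (p.1, p.2)) dA).items =
    ((l.foldl (fun d p => d.modify p.2 [] (· ++ [p.1])) dB).items).map pvF := by
  induction l generalizing dA dB with
  | nil => exact hI
  | cons p l ih =>
    obtain ⟨t, u⟩ := p
    have hkeys : dA.keys = dB.keys := by
      simp only [PySem.Dict.keys, hI, List.map_map]
      rfl
    have hc : dA.contains u = dB.contains u := by
      rw [PySem.Dict.contains_eq_decide_mem_keys, PySem.Dict.contains_eq_decide_mem_keys, hkeys]
    simp only [List.foldl_cons, PySem.Dict.modify]
    by_cases hcon : dB.contains u = true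
    · -- url already present: dB has a (u, ts) entry with ts ≠ []
      have hsome : (dB.get? u).isSome := by
        rw [← PySem.Dict.contains_eq_isSome_get?]; exact hcon
      obtain ⟨ts, hts⟩ := Option.isSome_iff_exists.mp hsome
      have hmem : (u, ts) ∈ dB.items := PySem.Dict.mem_items_of_get?_eq_some dB hts
      have htsne : ts ≠ [] := hne _ hmem
      have hBgetD : dB.getD u [] = ts := PySem.Dict.getD_of_mem_items dB hmem hnd []
      have hndA : dA.keys.Nodup := hkeys ▸ hnd
      have hmemA : (u, (PySem.List.maxD ts PySem.Str.len "", u)) ∈ dA.items := by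
        rw [hI]; exact List.mem_map.mpr ⟨(u, ts), hmem, rfl⟩
      have hAgetD : dA.getD u ("", "") = (PySem.List.maxD ts PySem.Str.len "", u) :=
        PySem.Dict.getD_of_mem_items dA hmemA hndA ("", "")
      -- uniqueness of the entry at key u in dB
      have huniq : ∀ kv ∈ dB.items, kv.1 = u → kv = (u, ts) := by
        intro kv hkv hk
        have := PySem.Dict.getD_of_mem_items dB hkv hnd []
        rw [hk, hBgetD] at this
        obtain ⟨k1, k2⟩ := kv; cases hk; cases this; rfl
      have hndB' : (dB.insert u (dB.getD u [] ++ [t])).keys.Nodup :=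
        PySem.Dict.nodup_keys_insert _ _ _ hnd
      have hneB' : ∀ kv ∈ (dB.insert u (dB.getD u [] ++ [t])).items, kv.2 ≠ [] := by
        intro kv hkv
        rcases (PySem.Dict.mem_items_insert _ _ _ _).mp hkv with h | ⟨h, _⟩
        · subst h; simp [hBgetD]
        · exact hne _ h
      rw [hc, if_pos hcon, hAgetD]
      by_cases hgt : PySem.Str.len t > PySem.Str.len (PySem.List.maxD ts PySem.Str.len "")
      · have hgt' : (PySem.List.maxD ts PySem.Str.len "").length < t.length := by
          simp [pysem] at hgt; exact_mod_cast hgt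
        rw [if_pos hgt]
        apply ih _ _ hndB' hneB'
        rw [PySem.Dict.items_insert_of_contains dA _ (hc ▸ hcon),
            PySem.Dict.items_insert_of_contains dB _ hcon, hI, List.map_map, List.map_map]
        apply List.map_congr_left
        intro kv hkv
        by_cases hk : kv.1 = u
        · have := huniq kv hkv hk
          subst this
          simp [pvF, hBgetD, pv_maxD_append ts t htsne, hgt']
        · simp [pvF, hk]
      · have hgt' : ¬ (PySem.List.maxD ts PySem.Str.len "").length < t.length := by
          simp [pysem] at hgt; omega
        rw [if_neg hgt]
        apply ih _ _ hndB' hneB'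
        rw [PySem.Dict.items_insert_of_contains dB _ hcon, hI, List.map_map]
        apply List.map_congr_left
        intro kv hkv
        by_cases hk : kv.1 = u
        · have := huniq kv hkv hk
          subst this
          simp [pvF, hBgetD, pv_maxD_append ts t htsne, hgt']
        · simp [pvF, hk]
    · -- fresh url: both sides append
      have hcon' : dB.contains u = false := by simpa using hcon
      have hBgetD : dB.getD u [] = [] := PySem.Dict.getD_of_not_contains dB (d0 := []) hcon'
      have hndB' : (dB.insert u (dB.getD u [] ++ [t])).keys.Nodup :=
        PySem.Dict.nodup_keys_insert _ _ _ hnd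
      have hneB' : ∀ kv ∈ (dB.insert u (dB.getD u [] ++ [t])).items, kv.2 ≠ [] := by
        intro kv hkv
        rcases (PySem.Dict.mem_items_insert _ _ _ _).mp hkv with h | ⟨h, _⟩
        · subst h; simp [hBgetD]
        · exact hne _ h
      rw [hc, if_neg (by simp [hcon'])]
      apply ih _ _ hndB' hneB'
      rw [PySem.Dict.items_insert_of_not_contains dA _ (by rw [hc]; exact hcon'),
          PySem.Dict.items_insert_of_not_contains dB _ hcon', List.map_append, hI, hBgetD]
      rfl

-- ===== VERDICT (by name: the statement is the Claim_ definition above) =====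
theorem filter_urls_by_title_length_spec : Claim_equal_filter_urls_by_title_length := by
  intro l _
  unfold Spec_filter_urls_by_title_length filter_urls_by_title_length filter_urls_by_title_length_alt
  simp only [PySem.Dict.values]
  rw [pv_loop_inv l PySem.Dict.empty PySem.Dict.empty (by simp) (by simp [PySem.Dict.empty]) rfl,
      List.map_map]
  rfl
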